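-- pv_equiv track=rewrite | github.com/willwhitney/TD3 | unified_runner.py | construct_varying_keys
-- ===== SOURCE A (Python) =====
-- def construct_varying_keys(grids):
--     all_keys = set().union(*[g.keys() for g in grids])
--     merged = {k: set() for k in all_keys}
--     for grid in grids:
--         for key in all_keys:
--             grid_key_value = grid[key] if key in grid else ["<<NONE>>"]
--             merged[key] = merged[key].union(grid_key_value)
--     varying_keys = {key for key in merged if len(merged[key]) > 1}
--     return varying_keys
-- ===== SOURCE B (Python) =====
-- def construct_varying_keys(grids):
--     n = len(grids)
--     merged = {}
--     count = {}
--     for grid in grids: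
--         for key, value in grid.items():
--             merged[key] = merged.get(key, set()).union(value)
--             count[key] = count.get(key, 0) + 1
--     for key, c in count.items():
--         if c < n:
--             merged[key].add("<<NONE>>")
--     return {key for key in merged if len(merged[key]) > 1}
-- ===== Notes on version B (the rewrite author's own statement) =====
-- stated objective: faster
-- what changed: Instead of building the full key set first and then scanning every key in every grid (with a membership test and sentinel insertion per absent key), B makes one pass over the grids' own items, unioning values and counting per-key appearances, and reconstructs absence afterwards by adding the sentinel exactly to keys whose appearance count is below len(grids).
import Mathlib
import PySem

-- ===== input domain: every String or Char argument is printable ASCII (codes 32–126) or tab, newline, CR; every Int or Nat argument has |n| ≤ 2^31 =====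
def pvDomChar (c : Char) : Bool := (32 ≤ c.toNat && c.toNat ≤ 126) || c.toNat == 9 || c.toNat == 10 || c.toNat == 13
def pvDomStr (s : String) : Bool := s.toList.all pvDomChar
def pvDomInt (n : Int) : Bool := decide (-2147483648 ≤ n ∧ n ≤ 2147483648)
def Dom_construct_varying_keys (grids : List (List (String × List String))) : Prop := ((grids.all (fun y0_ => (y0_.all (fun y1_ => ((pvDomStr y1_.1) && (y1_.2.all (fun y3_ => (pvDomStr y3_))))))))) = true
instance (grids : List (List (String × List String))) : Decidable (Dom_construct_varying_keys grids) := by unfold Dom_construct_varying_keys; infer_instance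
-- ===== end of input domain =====

-- B replaces A's scan of the full key set inside every grid by one pass over each grid's own
-- items with a per-key appearance counter, adding the absence sentinel afterwards (objective: faster).
-- Python sets have no modelled iteration order; outputs are compared as sets, and both ports list
-- the resulting keys in first-appearance order.

-- ===== PORT A =====
def construct_varying_keys (grids : List (List (String × List String))) : List String :=
  -- all_keys = set().union(*[g.keys() for g in grids])
  let all_keys : PySem.Set String :=
    (grids.map (fun g => (PySem.Dict.ofList g).keys)).foldl
      (fun s ks => PySem.Set.union s ks) PySem.Set.empty
  -- merged = {k: set() for k in all_keys}
  let merged0 : PySem.Dict String (PySem.Set String) :=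
    all_keys.foldl (fun m k => m.insert k PySem.Set.empty) PySem.Dict.empty
  -- for grid in grids: for key in all_keys: ...
  let merged :=
    grids.foldl (fun m grid =>
      all_keys.foldl (fun m key =>
        let g := PySem.Dict.ofList grid
        let v := if g.contains key then g.getD key [] else ["<<NONE>>"]
        m.insert key (PySem.Set.union (m.getD key PySem.Set.empty) v)) m) merged0
  -- varying_keys = {key for key in merged if len(merged[key]) > 1}
  PySem.Set.ofList (merged.keys.filter (fun k => 1 < PySem.Set.len (merged.getD k PySem.Set.empty)))

-- ===== PORT B =====
def construct_varying_keys_alt (grids : List (List (String × List String))) : List String :=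
  let n : Int := grids.length
  -- one pass over the grids' items: union values, count appearances
  let st :=
    grids.foldl (fun st grid =>
      (PySem.Dict.ofList grid).items.foldl (fun st kv =>
        (st.1.insert kv.1 (PySem.Set.union (st.1.getD kv.1 PySem.Set.empty) kv.2),
         st.2.insert kv.1 (st.2.getD kv.1 0 + 1))) st)
      ((PySem.Dict.empty, PySem.Dict.empty) :
        PySem.Dict String (PySem.Set String) × PySem.Dict String Int)
  -- for key, c in count.items(): if c < n: merged[key].add("<<NONE>>")
  let merged :=
    st.2.items.foldl (fun m kc =>
      if kc.2 < n then m.insert kc.1 (PySem.Set.add (m.getD kc.1 PySem.Set.empty) "<<NONE>>")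
      else m) st.1
  -- {key for key in merged if len(merged[key]) > 1}
  PySem.Set.ofList (merged.keys.filter (fun k => 1 < PySem.Set.len (merged.getD k PySem.Set.empty)))

-- ===== PRECONDITION & SPEC =====
def Spec_construct_varying_keys (grids : List (List (String × List String))) (out : List String) : Prop := out = construct_varying_keys_alt grids
instance (grids : List (List (String × List String))) (out : List String) : Decidable (Spec_construct_varying_keys grids out) := by unfold Spec_construct_varying_keys; infer_instance

-- ===== CLAIM (what is proved, stated in full; the proofs are below) =====
def Claim_equal_construct_varying_keys : Prop := ∀ (grids : List (List (String × List String))), Dom_construct_varying_keys grids → Spec_construct_varying_keys grids (construct_varying_keys grids)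

-- ===== LEMMAS AND PROOFS =====

-- Abbreviations (proof-only): the dicts, the flattened item list, the key list in
-- first-appearance order, and the per-key value sets each port ends up with.
def pvDicts (grids : List (List (String × List String))) : List (PySem.Dict String (List String)) :=
  grids.map PySem.Dict.ofList

def pvPairs (grids : List (List (String × List String))) : List (String × List String) :=
  (pvDicts grids).flatMap PySem.Dict.items

def pvK (grids : List (List (String × List String))) : List String :=
  PySem.Set.ofList ((pvDicts grids).flatMap PySem.Dict.keys)

def pvValA (g : PySem.Dict String (List String)) (k : String) : List String :=
  if g.contains k then g.getD k [] else ["<<NONE>>"]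

def pvSA (grids : List (List (String × List String))) (k : String) : PySem.Set String :=
  (pvDicts grids).foldl (fun s g => PySem.Set.union s (pvValA g k)) PySem.Set.empty

def pvSB (grids : List (List (String × List String))) (k : String) : PySem.Set String :=
  (((pvPairs grids).filter (fun kv => kv.1 == k)).map (·.2)).foldl PySem.Set.union PySem.Set.empty

def pvCnt (grids : List (List (String × List String))) (k : String) : Nat :=
  (pvPairs grids).countP (fun kv => kv.1 == k)

def pvSB2 (grids : List (List (String × List String))) (k : String) : PySem.Set String :=
  if (pvCnt grids k : Int) < (grids.length : Int) then PySem.Set.add (pvSB grids k) "<<NONE>>"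
  else pvSB grids k

-- membership / nodup of folds of unions
theorem mem_foldl_union {L : List (List String)} {s : PySem.Set String} {x : String} :
    x ∈ L.foldl PySem.Set.union s ↔ x ∈ s ∨ ∃ l ∈ L, x ∈ l := by
  induction L generalizing s with
  | nil => simp
  | cons a L ih =>
    simp only [List.foldl_cons, ih, PySem.Set.mem_union, List.mem_cons]
    constructor
    · rintro ((h | h) | ⟨l, hl, hx⟩)
      · exact .inl h
      · exact .inr ⟨a, .inl rfl, h⟩
      · exact .inr ⟨l, .inr hl, hx⟩
    · rintro (h | ⟨l, (rfl | hl), hx⟩)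
      · exact .inl (.inl h)
      · exact .inl (.inr hx)
      · exact .inr ⟨l, hl, hx⟩

theorem nodup_foldl_union {L : List (List String)} {s : PySem.Set String} (hs : s.Nodup) :
    (L.foldl PySem.Set.union s).Nodup := by
  induction L generalizing s with
  | nil => exact hs
  | cons a L ih => exact ih (PySem.Set.nodup_union _ _ hs)

theorem mem_foldl_union' {β : Type} (v : β → List String) {ds : List β} {s : PySem.Set String}
    {x : String} :
    x ∈ ds.foldl (fun s g => PySem.Set.union s (v g)) s ↔ x ∈ s ∨ ∃ g ∈ ds, x ∈ v g := by
  induction ds generalizing s with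
  | nil => simp
  | cons a ds ih =>
    simp only [List.foldl_cons, ih, PySem.Set.mem_union, List.mem_cons]
    constructor
    · rintro ((h | h) | ⟨g, hg, hx⟩)
      · exact .inl h
      · exact .inr ⟨a, .inl rfl, h⟩
      · exact .inr ⟨g, .inr hg, hx⟩
    · rintro (h | ⟨g, (rfl | hg), hx⟩)
      · exact .inl (.inl h)
      · exact .inl (.inr hx)
      · exact .inr ⟨g, hg, hx⟩

theorem nodup_foldl_union' {β : Type} (v : β → List String) {ds : List β}
    {s : PySem.Set String} (hs : s.Nodup) :
    (ds.foldl (fun s g => PySem.Set.union s (v g)) s).Nodup := by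
  induction ds generalizing s with
  | nil => exact hs
  | cons a ds ih => exact ih (PySem.Set.nodup_union _ _ hs)

-- dict items vs getD / contains (dicts built by ofList have nodup keys)
theorem getD_of_mem_items_aux {ν : Type} (l : List (String × ν)) (k : String) (v d0 : ν)
    (hnd : (l.map Prod.fst).Nodup) (h : (k, v) ∈ l) :
    (PySem.Dict.mk l).getD k d0 = v := by
  induction l with
  | nil => simp at h
  | cons p l ih =>
    obtain ⟨pk, pv⟩ := p
    simp only [List.map_cons, List.nodup_cons] at hnd
    rcases List.mem_cons.1 h with h1 | h1
    · cases h1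
      simp [PySem.Dict.getD, PySem.Dict.get?_mk_cons]
    · have hk : pk ≠ k := by
        intro he; exact hnd.1 (he ▸ (List.mem_map.2 ⟨(k, v), h1, rfl⟩))
      have := ih hnd.2 h1
      simpa [PySem.Dict.getD, PySem.Dict.get?_mk_cons, hk] using this

theorem getD_of_mem_items {ν : Type} {d : PySem.Dict String ν} {k : String} {v d0 : ν}
    (hnd : d.keys.Nodup) (h : (k, v) ∈ d.items) : d.getD k d0 = v := by
  obtain ⟨l⟩ := d
  exact getD_of_mem_items_aux l k v d0 hnd h

theorem mem_items_of_contains {ν : Type} {d : PySem.Dict String ν} {k : String} (d0 : ν)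
    (hnd : d.keys.Nodup) (h : d.contains k) : (k, d.getD k d0) ∈ d.items := by
  have hk : k ∈ d.keys := (PySem.Dict.contains_iff_mem_keys d k).1 h
  obtain ⟨v, hv, he⟩ := List.mem_map.1 hk
  obtain ⟨k', v'⟩ := v
  cases he
  rw [getD_of_mem_items hnd hv]
  exact hv

theorem countP_items_key {ν : Type} (d : PySem.Dict String ν) (k : String)
    (hnd : d.keys.Nodup) :
    d.items.countP (fun kv => kv.1 == k) = if d.contains k then 1 else 0 := by
  have h1 : d.items.countP (fun kv => kv.1 == k) = List.count k d.keys := by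
    simp [PySem.Dict.keys, List.countP_map, List.count, Function.comp_def]
  rw [h1]
  by_cases h : d.contains k
  · rw [if_pos h, List.count_eq_one_of_mem hnd ((PySem.Dict.contains_iff_mem_keys d k).1 h)]
  · rw [if_neg h, List.count_eq_zero]
    intro hm; exact h ((PySem.Dict.contains_iff_mem_keys d k).2 hm)

-- the appearance count: bounded by the number of grids, short exactly when some grid misses k
theorem cnt_le (grids : List (List (String × List String))) (k : String) :
    pvCnt grids k ≤ grids.length := by
  induction grids with
  | nil => simp [pvCnt, pvPairs, pvDicts]
  | cons g gs ih =>
    have h := countP_items_key (PySem.Dict.ofList g) k (PySem.Dict.nodup_keys_ofList g)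
    simp only [pvCnt, pvPairs, pvDicts, List.map_cons, List.flatMap_cons, List.countP_append,
      List.length_cons] at *
    split at h <;> omega

theorem cnt_lt_iff (grids : List (List (String × List String))) (k : String) :
    pvCnt grids k < grids.length ↔ ∃ g ∈ pvDicts grids, ¬ g.contains k := by
  induction grids with
  | nil => simp [pvCnt, pvPairs, pvDicts]
  | cons g gs ih =>
    have h := countP_items_key (PySem.Dict.ofList g) k (PySem.Dict.nodup_keys_ofList g)
    have hle := cnt_le gs k
    simp only [pvCnt, pvPairs, pvDicts, List.map_cons, List.flatMap_cons, List.countP_append,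
      List.length_cons, List.mem_cons] at *
    constructor
    · intro hlt
      by_cases hc : (PySem.Dict.ofList g).contains k
      · rw [if_pos hc] at h
        obtain ⟨g', hg', hn⟩ := ih.1 (by omega)
        exact ⟨g', .inr hg', hn⟩
      · exact ⟨PySem.Dict.ofList g, .inl rfl, by simp [hc]⟩
    · rintro ⟨g', (rfl | hg'), hn⟩
      · rw [if_neg (by simpa using hn)] at h; omega
      · have := ih.2 ⟨g', hg', hn⟩
        split at h <;> omega

-- nodup keys of every dict in pvDicts
theorem nodup_keys_of_mem_pvDicts {grids : List (List (String × List String))}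
    {g : PySem.Dict String (List String)} (hg : g ∈ pvDicts grids) : g.keys.Nodup := by
  obtain ⟨g0, _, rfl⟩ := List.mem_map.1 hg
  exact PySem.Dict.nodup_keys_ofList g0

-- membership in the per-key sets
theorem mem_pvSB {grids : List (List (String × List String))} {k x : String} :
    x ∈ pvSB grids k ↔ ∃ g ∈ pvDicts grids, g.contains k ∧ x ∈ g.getD k [] := by
  rw [pvSB, mem_foldl_union]
  simp only [PySem.Set.empty, List.not_mem_nil, false_or, List.mem_map, List.mem_filter,
    beq_iff_eq]
  constructor
  · rintro ⟨l, ⟨⟨k', v⟩, ⟨⟨hkv, hk1⟩, hl⟩⟩, hx⟩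
    simp only at hk1 hl
    rw [hk1] at hkv
    subst hl
    obtain ⟨g, hg, hmem⟩ := List.mem_flatMap.1 hkv
    refine ⟨g, hg, ?_, ?_⟩
    · exact (PySem.Dict.contains_iff_mem_keys g k).2
        (List.mem_map.2 ⟨(k, v), hmem, rfl⟩)
    · rw [getD_of_mem_items (nodup_keys_of_mem_pvDicts hg) hmem]
      simpa using hx
  · rintro ⟨g, hg, hc, hx⟩
    exact ⟨g.getD k [], ⟨(k, g.getD k []),
      ⟨⟨List.mem_flatMap.2 ⟨g, hg, mem_items_of_contains [] (nodup_keys_of_mem_pvDicts hg) hc⟩,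
        rfl⟩, rfl⟩⟩, hx⟩

theorem mem_pvSA {grids : List (List (String × List String))} {k x : String} :
    x ∈ pvSA grids k ↔
      (∃ g ∈ pvDicts grids, g.contains k ∧ x ∈ g.getD k []) ∨
      (x = "<<NONE>>" ∧ ∃ g ∈ pvDicts grids, ¬ g.contains k) := by
  rw [pvSA, mem_foldl_union' (fun g => pvValA g k)]
  simp only [PySem.Set.empty, List.not_mem_nil, false_or]
  constructor
  · rintro ⟨g, hg, hx⟩
    by_cases hc : g.contains k
    · exact .inl ⟨g, hg, hc, by simpa [pvValA, hc] using hx⟩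
    · refine .inr ⟨?_, g, hg, by simp [hc]⟩
      simpa [pvValA, hc] using hx
  · rintro (⟨g, hg, hc, hx⟩ | ⟨rfl, g, hg, hc⟩)
    · exact ⟨g, hg, by simpa [pvValA, hc] using hx⟩
    · exact ⟨g, hg, by simp [pvValA, hc]⟩

-- the central per-key fact: both value sets have the same length
theorem key_len_eq (grids : List (List (String × List String))) (k : String) :
    (pvSA grids k).length = (pvSB2 grids k).length := by
  have hA : (pvSA grids k).Nodup := by
    rw [pvSA]; exact nodup_foldl_union' _ List.nodup_nil
  have hB : (pvSB grids k).Nodup := by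
    rw [pvSB]; exact nodup_foldl_union List.nodup_nil
  have hB2 : (pvSB2 grids k).Nodup := by
    rw [pvSB2]; split
    · exact PySem.Set.nodup_add _ _ hB
    · exact hB
  refine List.Perm.length_eq ((List.perm_ext_iff_of_nodup hA hB2).2 ?_)
  intro x
  have hcast : ((pvCnt grids k : Int) < (grids.length : Int)) ↔ pvCnt grids k < grids.length := by
    exact_mod_cast Iff.rfl
  rw [mem_pvSA, pvSB2]
  by_cases hlt : pvCnt grids k < grids.length
  · rw [if_pos (hcast.2 hlt), PySem.Set.mem_add, mem_pvSB]
    rw [cnt_lt_iff] at hlt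
    constructor
    · rintro (h | ⟨rfl, _⟩)
      · exact .inl h
      · exact .inr rfl
    · rintro (h | rfl)
      · exact .inl h
      · exact .inr ⟨rfl, hlt⟩
  · rw [if_neg (fun h => hlt (hcast.1 h)), mem_pvSB]
    rw [cnt_lt_iff] at hlt
    constructor
    · rintro (h | ⟨rfl, g, hg, hc⟩)
      · exact h
      · exact absurd ⟨g, hg, hc⟩ hlt
    · exact .inl

-- a nodup list is its own set; updates by contained elements are no-ops
theorem update_eq_append {s : PySem.Set String} {l : List String} (hl : l.Nodup)
    (hd : ∀ x ∈ l, x ∉ s) : PySem.Set.update s l = s ++ l := by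
  induction l generalizing s with
  | nil => simp [PySem.Set.update]
  | cons a l ih =>
    rw [List.nodup_cons] at hl
    have ha : PySem.Set.add s a = s ++ [a] := by
      simp only [PySem.Set.add, PySem.Set.contains]
      rw [if_neg (by simpa using fun h => hd a List.mem_cons_self (List.contains_iff_mem.1 h))]
    show PySem.Set.update (PySem.Set.add s a) l = s ++ a :: l
    rw [ha, ih hl.2, List.append_assoc]
    · rfl
    · intro x hx
      simp only [List.mem_append, List.mem_singleton]
      rintro (h | rfl)
      · exact hd x (List.mem_cons_of_mem _ hx) h
      · exact hl.1 hx

theorem ofList_eq_self {l : List String} (h : l.Nodup) : PySem.Set.ofList l = l := by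
  have h0 : PySem.Set.ofList l = PySem.Set.update PySem.Set.empty l := rfl
  rw [h0, update_eq_append h (by simp [PySem.Set.empty])]
  rfl

theorem update_of_subset {s : PySem.Set String} {xs : List String} (h : ∀ x ∈ xs, x ∈ s) :
    PySem.Set.update s xs = s := by
  induction xs generalizing s with
  | nil => rfl
  | cons a xs ih =>
    have ha : PySem.Set.add s a = s := by
      simp only [PySem.Set.add, PySem.Set.contains]
      rw [if_pos (List.contains_iff_mem.2 (h a List.mem_cons_self))]
    show PySem.Set.update (PySem.Set.add s a) xs = s
    rw [ha]
    exact ih (fun x hx => h x (List.mem_cons_of_mem _ hx))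

-- ==== characterisation of port A ====

theorem A_all_keys (grids : List (List (String × List String))) :
    (grids.map (fun g => (PySem.Dict.ofList g).keys)).foldl
      (fun s ks => PySem.Set.union s ks) PySem.Set.empty = pvK grids := by
  rw [pvK, PySem.Set.ofList, List.foldl_flatMap, pvDicts, List.foldl_map, List.foldl_map]
  rfl

theorem merged0_getD (L : List String) (m : PySem.Dict String (PySem.Set String)) (k : String)
    (hm : m.getD k PySem.Set.empty = PySem.Set.empty) :
    (L.foldl (fun m k' => m.insert k' PySem.Set.empty) m).getD k PySem.Set.empty
      = PySem.Set.empty := by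
  induction L generalizing m with
  | nil => exact hm
  | cons a L ih =>
    refine ih _ ?_
    rw [PySem.Dict.getD_insert]
    split
    · rfl
    · exact hm

theorem foldA_getD_notmem (v : String → List String) (L : List String)
    (m : PySem.Dict String (PySem.Set String)) (k : String) (hk : k ∉ L) :
    (L.foldl (fun m key =>
        m.insert key (PySem.Set.union (m.getD key PySem.Set.empty) (v key))) m).getD k
      PySem.Set.empty = m.getD k PySem.Set.empty := by
  induction L generalizing m with
  | nil => rfl
  | cons a L ih =>
    have hka : k ≠ a := fun h => hk (h ▸ List.mem_cons_self)
    rw [List.foldl_cons, ih _ (fun h => hk (List.mem_cons_of_mem _ h)),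
      PySem.Dict.getD_insert, if_neg hka]

theorem foldA_getD_mem (v : String → List String) (L : List String) (hL : L.Nodup)
    (m : PySem.Dict String (PySem.Set String)) (k : String) (hk : k ∈ L) :
    (L.foldl (fun m key =>
        m.insert key (PySem.Set.union (m.getD key PySem.Set.empty) (v key))) m).getD k
      PySem.Set.empty = PySem.Set.union (m.getD k PySem.Set.empty) (v k) := by
  induction L generalizing m with
  | nil => simp at hk
  | cons a L ih =>
    rw [List.nodup_cons] at hL
    rcases List.mem_cons.1 hk with rfl | hk'
    · rw [List.foldl_cons, foldA_getD_notmem _ _ _ _ hL.1, PySem.Dict.getD_insert_self]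
    · have hka : a ≠ k := fun h => hL.1 (h ▸ hk')
      rw [List.foldl_cons, ih hL.2 _ hk', PySem.Dict.getD_insert, if_neg (Ne.symm hka)]

theorem foldA_keys (v : String → List String) (L : List String)
    (m : PySem.Dict String (PySem.Set String)) (h : ∀ x ∈ L, x ∈ m.keys) :
    (L.foldl (fun m key =>
        m.insert key (PySem.Set.union (m.getD key PySem.Set.empty) (v key))) m).keys
      = m.keys := by
  rw [PySem.Dict.keys_foldl_insert_key L (fun x => x)
    (fun m key => PySem.Set.union (m.getD key PySem.Set.empty) (v key)) m]
  rw [List.map_id']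
  exact update_of_subset h

theorem foldA_outer_getD (ds : List (PySem.Dict String (List String))) (L : List String)
    (hL : L.Nodup) (k : String) (hk : k ∈ L)
    (m : PySem.Dict String (PySem.Set String)) :
    (ds.foldl (fun m g => L.foldl (fun m key =>
        m.insert key (PySem.Set.union (m.getD key PySem.Set.empty) (pvValA g key))) m) m).getD k
      PySem.Set.empty
    = ds.foldl (fun s g => PySem.Set.union s (pvValA g k)) (m.getD k PySem.Set.empty) := by
  induction ds generalizing m with
  | nil => rfl
  | cons g ds ih =>
    rw [List.foldl_cons, ih, List.foldl_cons, foldA_getD_mem _ _ hL _ _ hk]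

theorem foldA_outer_keys (ds : List (PySem.Dict String (List String))) (L : List String)
    (m : PySem.Dict String (PySem.Set String)) (hm : ∀ x ∈ L, x ∈ m.keys) :
    (ds.foldl (fun m g => L.foldl (fun m key =>
        m.insert key (PySem.Set.union (m.getD key PySem.Set.empty) (pvValA g key))) m) m).keys
      = m.keys := by
  induction ds generalizing m with
  | nil => rfl
  | cons g ds ih =>
    rw [List.foldl_cons, ih, foldA_keys _ _ _ hm]
    intro x hx; rw [foldA_keys _ _ _ hm]; exact hm x hx

theorem merged0_keys (L : List String) :
    (L.foldl (fun m k => m.insert k (PySem.Set.empty : PySem.Set String))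
        PySem.Dict.empty).keys = PySem.Set.ofList L := by
  rw [PySem.Dict.keys_foldl_insert_key L (fun x => x) (fun _ _ => PySem.Set.empty)
    PySem.Dict.empty, List.map_id']
  rfl

theorem A_eq (grids : List (List (String × List String))) :
    construct_varying_keys grids
      = PySem.Set.ofList ((pvK grids).filter
          (fun k => 1 < PySem.Set.len (pvSA grids k))) := by
  have hK : (pvK grids).Nodup := PySem.Set.nodup_ofList _
  rw [construct_varying_keys]
  simp only [A_all_keys]
  rw [show (fun (m : PySem.Dict String (PySem.Set String))
        (grid : List (String × List String)) =>
        (pvK grids).foldl (fun m key =>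
          let g := PySem.Dict.ofList grid
          let v := if g.contains key then g.getD key [] else ["<<NONE>>"]
          m.insert key (PySem.Set.union (m.getD key PySem.Set.empty) v)) m)
      = (fun m grid => (pvK grids).foldl (fun m key =>
          m.insert key (PySem.Set.union (m.getD key PySem.Set.empty)
            (pvValA (PySem.Dict.ofList grid) key))) m) from rfl]
  rw [show (grids.foldl (fun m grid => (pvK grids).foldl (fun m key =>
        m.insert key (PySem.Set.union (m.getD key PySem.Set.empty)
          (pvValA (PySem.Dict.ofList grid) key))) m)
        ((pvK grids).foldl (fun m k => m.insert k PySem.Set.empty) PySem.Dict.empty))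
      = ((pvDicts grids).foldl (fun m g => (pvK grids).foldl (fun m key =>
          m.insert key (PySem.Set.union (m.getD key PySem.Set.empty) (pvValA g key))) m)
        ((pvK grids).foldl (fun m k => m.insert k PySem.Set.empty) PySem.Dict.empty)) by
    rw [pvDicts, List.foldl_map]]
  have hkeys0 : ∀ x ∈ pvK grids,
      x ∈ ((pvK grids).foldl (fun m k => m.insert k (PySem.Set.empty : PySem.Set String))
        PySem.Dict.empty).keys := by
    intro x hx
    rw [merged0_keys, ofList_eq_self hK]
    exact hx
  rw [foldA_outer_keys _ _ _ hkeys0, merged0_keys, ofList_eq_self hK]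
  refine congrArg PySem.Set.ofList (List.filter_congr ?_)
  intro k hk
  rw [foldA_outer_getD _ _ hK _ hk, merged0_getD _ _ _ (PySem.Dict.getD_empty _ _)]
  rw [show ((pvDicts grids).foldl (fun s g => PySem.Set.union s (pvValA g k)) PySem.Set.empty)
      = pvSA grids k from rfl]

-- ==== characterisation of port B ====

theorem foldB_merged_getD (ps : List (String × List String))
    (m : PySem.Dict String (PySem.Set String)) (k : String) :
    (ps.foldl (fun m kv =>
        m.insert kv.1 (PySem.Set.union (m.getD kv.1 PySem.Set.empty) kv.2)) m).getD k
      PySem.Set.empty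
    = ((ps.filter (fun kv => kv.1 == k)).map (·.2)).foldl PySem.Set.union
        (m.getD k PySem.Set.empty) := by
  induction ps generalizing m with
  | nil => rfl
  | cons kv ps ih =>
    by_cases hk : kv.1 = k
    · rw [List.foldl_cons, ih, List.filter_cons_of_pos (by simpa using hk), List.map_cons,
        List.foldl_cons, PySem.Dict.getD_insert, if_pos hk.symm, hk]
    · rw [List.foldl_cons, ih, List.filter_cons_of_neg (by simpa using hk),
        PySem.Dict.getD_insert, if_neg (fun h => hk h.symm)]

theorem foldB_count_getD (ps : List (String × List String))
    (c : PySem.Dict String Int) (k : String) :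
    (ps.foldl (fun c kv => c.insert kv.1 (c.getD kv.1 0 + 1)) c).getD k 0
    = c.getD k 0 + (ps.countP (fun kv => kv.1 == k) : Int) := by
  induction ps generalizing c with
  | nil => simp
  | cons kv ps ih =>
    by_cases hk : kv.1 = k
    · rw [List.foldl_cons, ih, List.countP_cons_of_pos (by simpa using hk),
        PySem.Dict.getD_insert, if_pos hk.symm, hk]
      push_cast
      ring
    · rw [List.foldl_cons, ih, List.countP_cons_of_neg (by simpa using hk),
        PySem.Dict.getD_insert, if_neg (fun h => hk h.symm)]

-- the sentinel loop over the count dict's items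
theorem foldS_getD_notmem (n : Int) (L : List (String × Int))
    (m : PySem.Dict String (PySem.Set String)) (k : String) (hk : k ∉ L.map Prod.fst) :
    (L.foldl (fun m kc => if kc.2 < n then
        m.insert kc.1 (PySem.Set.add (m.getD kc.1 PySem.Set.empty) "<<NONE>>") else m) m).getD k
      PySem.Set.empty = m.getD k PySem.Set.empty := by
  induction L generalizing m with
  | nil => rfl
  | cons kc L ih =>
    simp only [List.map_cons, List.mem_cons, not_or] at hk
    rw [List.foldl_cons, ih _ hk.2]
    split
    · rw [PySem.Dict.getD_insert, if_neg hk.1]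
    · rfl

theorem foldS_getD_mem (n : Int) (L : List (String × Int)) (hL : (L.map Prod.fst).Nodup)
    (m : PySem.Dict String (PySem.Set String)) (k : String) (c : Int) (hk : (k, c) ∈ L) :
    (L.foldl (fun m kc => if kc.2 < n then
        m.insert kc.1 (PySem.Set.add (m.getD kc.1 PySem.Set.empty) "<<NONE>>") else m) m).getD k
      PySem.Set.empty
    = if c < n then PySem.Set.add (m.getD k PySem.Set.empty) "<<NONE>>"
      else m.getD k PySem.Set.empty := by
  induction L generalizing m with
  | nil => simp at hk
  | cons kc L ih =>
    simp only [List.map_cons, List.nodup_cons] at hL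
    rcases List.mem_cons.1 hk with h1 | h1
    · cases h1
      rw [List.foldl_cons, foldS_getD_notmem _ _ _ _ hL.1]
      split
      · rw [PySem.Dict.getD_insert_self]
      · rfl
    · have hka : kc.1 ≠ k := by
        intro he; exact hL.1 (he ▸ (List.mem_map.2 ⟨(k, c), h1, rfl⟩))
      have hstep : (if kc.2 < n then
          m.insert kc.1 (PySem.Set.add (m.getD kc.1 PySem.Set.empty) "<<NONE>>") else m).getD k
            PySem.Set.empty = m.getD k PySem.Set.empty := by
        split
        · rw [PySem.Dict.getD_insert, if_neg (Ne.symm hka)]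
        · rfl
      rw [List.foldl_cons, ih hL.2 _ h1, hstep]

theorem foldS_keys (n : Int) (L : List (String × Int))
    (m : PySem.Dict String (PySem.Set String)) (hm : ∀ kc ∈ L, kc.1 ∈ m.keys) :
    (L.foldl (fun m kc => if kc.2 < n then
        m.insert kc.1 (PySem.Set.add (m.getD kc.1 PySem.Set.empty) "<<NONE>>") else m) m).keys
      = m.keys := by
  induction L generalizing m with
  | nil => rfl
  | cons kc L ih =>
    rw [List.foldl_cons]
    have hstep : (if kc.2 < n then
        m.insert kc.1 (PySem.Set.add (m.getD kc.1 PySem.Set.empty) "<<NONE>>") else m).keys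
        = m.keys := by
      split
      · exact PySem.Dict.keys_insert_of_contains m _
          ((PySem.Dict.contains_iff_mem_keys m kc.1).2 (hm kc List.mem_cons_self))
      · rfl
    rw [ih _ (fun kc' h => by rw [hstep]; exact hm kc' (List.mem_cons_of_mem _ h)), hstep]

theorem B_eq (grids : List (List (String × List String))) :
    construct_varying_keys_alt grids
      = PySem.Set.ofList ((pvK grids).filter
          (fun k => 1 < PySem.Set.len (pvSB2 grids k))) := by
  have hK : (pvK grids).Nodup := PySem.Set.nodup_ofList _
  rw [construct_varying_keys_alt]
  rw [show (grids.foldl (fun st grid =>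
        (PySem.Dict.ofList grid).items.foldl (fun st kv =>
          (st.1.insert kv.1 (PySem.Set.union (st.1.getD kv.1 PySem.Set.empty) kv.2),
           st.2.insert kv.1 (st.2.getD kv.1 0 + 1))) st)
        ((PySem.Dict.empty, PySem.Dict.empty) :
          PySem.Dict String (PySem.Set String) × PySem.Dict String Int))
      = ((pvPairs grids).foldl (fun st kv =>
          (st.1.insert kv.1 (PySem.Set.union (st.1.getD kv.1 PySem.Set.empty) kv.2),
           st.2.insert kv.1 (st.2.getD kv.1 0 + 1)))
          (PySem.Dict.empty, PySem.Dict.empty)) by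
    rw [pvPairs, List.foldl_flatMap, pvDicts, List.foldl_map]]
  rw [PySem.List.foldl_prod_mk
    (fun (m : PySem.Dict String (PySem.Set String)) (kv : String × List String) =>
      m.insert kv.1 (PySem.Set.union (m.getD kv.1 PySem.Set.empty) kv.2))
    (fun (c : PySem.Dict String Int) (kv : String × List String) =>
      c.insert kv.1 (c.getD kv.1 0 + 1))
    (pvPairs grids) PySem.Dict.empty PySem.Dict.empty]
  simp only
  have hmapfst : (pvPairs grids).map Prod.fst = (pvDicts grids).flatMap PySem.Dict.keys := by
    rw [pvPairs, List.map_flatMap]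
    rfl
  have hkeysM : ((pvPairs grids).foldl (fun m kv =>
      m.insert kv.1 (PySem.Set.union (m.getD kv.1 PySem.Set.empty) kv.2))
        PySem.Dict.empty).keys = pvK grids := by
    rw [PySem.Dict.keys_foldl_insert_key (pvPairs grids) Prod.fst
      (fun m kv => PySem.Set.union (m.getD kv.1 PySem.Set.empty) kv.2) PySem.Dict.empty,
      hmapfst]
    rfl
  have hkeysC : ((pvPairs grids).foldl
      (fun (c : PySem.Dict String Int) kv => c.insert kv.1 (c.getD kv.1 0 + 1))
        PySem.Dict.empty).keys = pvK grids := by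
    rw [PySem.Dict.keys_foldl_insert_key (pvPairs grids) Prod.fst
      (fun (c : PySem.Dict String Int) kv => c.getD kv.1 0 + 1) PySem.Dict.empty, hmapfst]
    rfl
  have hndC : (((pvPairs grids).foldl
      (fun (c : PySem.Dict String Int) kv => c.insert kv.1 (c.getD kv.1 0 + 1))
        PySem.Dict.empty).keys).Nodup := by
    rw [hkeysC]; exact PySem.Set.nodup_ofList _
  have hitems : ∀ kc ∈ ((pvPairs grids).foldl
      (fun (c : PySem.Dict String Int) kv => c.insert kv.1 (c.getD kv.1 0 + 1))
        PySem.Dict.empty).items, kc.1 ∈ pvK grids := by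
    intro kc hkc
    rw [← hkeysC]
    exact List.mem_map.2 ⟨kc, hkc, rfl⟩
  rw [foldS_keys _ _ _ (fun kc h => by rw [hkeysM]; exact hitems kc h), hkeysM]
  refine congrArg PySem.Set.ofList (List.filter_congr ?_)
  intro k hk
  have hkC : k ∈ ((pvPairs grids).foldl
      (fun (c : PySem.Dict String Int) kv => c.insert kv.1 (c.getD kv.1 0 + 1))
      PySem.Dict.empty).keys := by rw [hkeysC]; exact hk
  obtain ⟨⟨k', c⟩, hmemI, hfst⟩ := List.mem_map.1 hkC
  simp only at hfst
  rw [hfst] at hmemI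
  have hc : c = (pvCnt grids k : Int) := by
    have h1 := getD_of_mem_items (d0 := (0 : Int)) hndC hmemI
    rw [foldB_count_getD, PySem.Dict.getD_empty] at h1
    rw [← h1, pvCnt]
    ring
  have hfstnd : (((pvPairs grids).foldl
      (fun (c : PySem.Dict String Int) kv => c.insert kv.1 (c.getD kv.1 0 + 1))
      PySem.Dict.empty).items.map Prod.fst).Nodup := hndC
  rw [foldS_getD_mem _ _ hfstnd _ _ c hmemI, foldB_merged_getD, PySem.Dict.getD_empty, hc]
  rw [show (((pvPairs grids).filter (fun kv => kv.1 == k)).map (·.2)).foldl PySem.Set.union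
      PySem.Set.empty = pvSB grids k from rfl]
  rw [pvSB2]

-- ===== VERDICT (by name: the statement is the Claim_ definition above) =====
theorem construct_varying_keys_spec : Claim_equal_construct_varying_keys := by
  unfold Claim_equal_construct_varying_keys
  intro grids _
  unfold Spec_construct_varying_keys
  rw [A_eq, B_eq]
  refine congrArg PySem.Set.ofList (List.filter_congr ?_)
  intro k hk
  have h := key_len_eq grids k
  simp only [PySem.Set.len, h]
  rfl
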